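-- pv_equiv track=rewrite | github.com/omkar-javadwar/CodeWars | katas/kyu_7/Alphabetical_Sequence.py | alpha_seq
-- ===== SOURCE A (Python) =====
-- def alpha_seq(string):
--     alphabet_order = {'a' : 'A', 'b' : 'Bb', 'c' : 'Ccc', 'd' : 'Dddd', 'e' : 'Eeeee',
--                     'f' : 'Ffffff', 'g' : 'Ggggggg', 'h' : 'Hhhhhhhh', 'i' : 'Iiiiiiiii', 'j' : 'Jjjjjjjjjj',
--                     'k' : 'Kkkkkkkkkkk', 'l':'Llllllllllll', 'm':'Mmmmmmmmmmmmm', 'n':'Nnnnnnnnnnnnnn',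
--                     'o':'Ooooooooooooooo', 'p':'Pppppppppppppppp', 'q':'Qqqqqqqqqqqqqqqqq',
--                     'r':'Rrrrrrrrrrrrrrrrrr', 's':'Sssssssssssssssssss', 't':'Tttttttttttttttttttt',
--                     'u':'Uuuuuuuuuuuuuuuuuuuuu', 'v':'Vvvvvvvvvvvvvvvvvvvvvv', 'w':'Wwwwwwwwwwwwwwwwwwwwwww',
--                     'x':'Xxxxxxxxxxxxxxxxxxxxxxxx', 'y':'Yyyyyyyyyyyyyyyyyyyyyyyyy', 'z':'Zzzzzzzzzzzzzzzzzzzzzzzzzz'}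
--     return ','.join([alphabet_order[i] for i in sorted(list(string.lower()))])
-- ===== SOURCE B (Python) =====
-- def alpha_seq(string):
--     s = string.lower()
--     pieces = []
--     for i in range(26):
--         ch = chr(97 + i)
--         pieces.extend([ch.upper() + ch * i] * s.count(ch))
--     return ','.join(pieces)
-- ===== Notes on version B (the rewrite author's own statement) =====
-- stated objective: faster
-- what changed: B replaces sort-then-dict-lookup with per-letter counting of the lowercased string and then emits the 26 letter pieces in alphabetical order, repeated by their counts.
import Mathlib
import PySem

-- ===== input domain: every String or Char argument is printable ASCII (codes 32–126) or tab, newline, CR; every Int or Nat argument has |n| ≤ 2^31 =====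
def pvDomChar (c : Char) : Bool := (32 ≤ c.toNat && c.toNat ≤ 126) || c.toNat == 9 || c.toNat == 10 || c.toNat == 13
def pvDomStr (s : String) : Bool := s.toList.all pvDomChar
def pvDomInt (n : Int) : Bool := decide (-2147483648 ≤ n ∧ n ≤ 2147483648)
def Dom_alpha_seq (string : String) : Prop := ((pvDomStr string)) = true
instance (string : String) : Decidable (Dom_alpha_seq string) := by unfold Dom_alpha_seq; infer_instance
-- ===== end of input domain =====

-- B avoids sorting: it counts each of the 26 letters in the lowercased string and emits the
-- letter pieces in alphabetical order, repeated by their counts (objective: faster; measured so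
-- in a timing run).

-- ===== PORT A =====
def alpha_seq (string : String) : String :=
  let alphabet_order : PySem.Dict Char String := PySem.Dict.mk
    [('a', "A"),
     ('b', "Bb"),
     ('c', "Ccc"),
     ('d', "Dddd"),
     ('e', "Eeeee"),
     ('f', "Ffffff"),
     ('g', "Ggggggg"),
     ('h', "Hhhhhhhh"),
     ('i', "Iiiiiiiii"),
     ('j', "Jjjjjjjjjj"),
     ('k', "Kkkkkkkkkkk"),
     ('l', "Llllllllllll"),
     ('m', "Mmmmmmmmmmmmm"),
     ('n', "Nnnnnnnnnnnnnn"),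
     ('o', "Ooooooooooooooo"),
     ('p', "Pppppppppppppppp"),
     ('q', "Qqqqqqqqqqqqqqqqq"),
     ('r', "Rrrrrrrrrrrrrrrrrr"),
     ('s', "Sssssssssssssssssss"),
     ('t', "Tttttttttttttttttttt"),
     ('u', "Uuuuuuuuuuuuuuuuuuuuu"),
     ('v', "Vvvvvvvvvvvvvvvvvvvvvv"),
     ('w', "Wwwwwwwwwwwwwwwwwwwwwww"),
     ('x', "Xxxxxxxxxxxxxxxxxxxxxxxx"),
     ('y', "Yyyyyyyyyyyyyyyyyyyyyyyyy"),
     ('z', "Zzzzzzzzzzzzzzzzzzzzzzzzzz")]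
  -- alphabet_order[i]: KeyError (get? = none) on a non-letter — excluded by Pre_; .getD "" marks that case
  PySem.Str.join ","
    ((PySem.List.sorted (PySem.Chars.lower string.toList) (fun c => c) false).map
      (fun i => (alphabet_order.get? i).getD ""))

-- ===== PORT B =====
def alpha_seq_alt (string : String) : String :=
  let s := PySem.Str.lower string
  let pieces := (PySem.List.pyRange 0 26 1).foldl
      (fun acc i =>
        let ch := Char.ofNat (97 + i.toNat)
        acc ++ List.replicate (PySem.Str.count s (String.ofList [ch]))
            (String.ofList (PySem.Chars.upperChar ch :: List.replicate i.toNat ch))) []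
  PySem.Str.join "," pieces

-- ===== PRECONDITION & SPEC =====
-- Pre_ excludes strings containing any non-letter character: A raises KeyError there.
def Pre_alpha_seq (string : String) : Prop :=
  (string.toList.all (fun c => PySem.Chars.isalpha c)) = true
instance (string : String) : Decidable (Pre_alpha_seq string) := by unfold Pre_alpha_seq; infer_instance
def pvWitness_alpha_seq : String := "CodeWars"

def Spec_alpha_seq (string : String) (out : String) : Prop := out = alpha_seq_alt string
instance (string : String) (out : String) : Decidable (Spec_alpha_seq string out) := by unfold Spec_alpha_seq; infer_instance

-- ===== CLAIM (what is proved, stated in full; the proofs are below) =====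
def Claim_equal_alpha_seq : Prop := ∀ (string : String), Dom_alpha_seq string → Pre_alpha_seq string → Spec_alpha_seq string (alpha_seq string)

-- ===== LEMMAS AND PROOFS =====

-- the 26 lower-case letters, in order
def pvAlpha : List Char := ['a','b','c','d','e','f','g','h','i','j','k','l','m','n','o','p','q','r','s','t','u','v','w','x','y','z']

theorem pv_mem_alpha (c : Char) (h : PySem.Chars.isalpha c = true) :
    PySem.Chars.lowerChar c ∈ pvAlpha := by
  have hb : 65 ≤ c.toNat ∧ c.toNat ≤ 122 := by
    simp only [PySem.Chars.isalpha, PySem.Chars.isupper, PySem.Chars.islower,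
      Bool.or_eq_true, Bool.and_eq_true, decide_eq_true_eq] at h
    rcases h with ⟨h1, h2⟩ | ⟨h1, h2⟩ <;>
      rw [Char.le_def, UInt32.le_iff_toNat_le] at h1 h2
    · have hA : 65 ≤ c.toNat := h1
      have hZ : c.toNat ≤ 90 := h2
      omega
    · have hA : 97 ≤ c.toNat := h1
      have hZ : c.toNat ≤ 122 := h2
      omega
  obtain ⟨h1, h2⟩ := hb
  have he := Char.ofNat_toNat c
  rw [← he] at h ⊢
  interval_cases h3 : c.toNat <;> first | decide | (exact absurd h (by decide))

theorem pv_count_flatMap (as : List Char) (hnd : as.Nodup) (n : Char → Nat) (x : Char) :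
    (as.flatMap fun c => List.replicate (n c) c).count x = if x ∈ as then n x else 0 := by
  induction as with
  | nil => simp
  | cons a t ih =>
    simp only [List.nodup_cons] at hnd
    obtain ⟨hna, hnd⟩ := hnd
    by_cases hxa : x = a
    · subst hxa
      simp [List.count_append, ih hnd, hna]
    · simp [List.count_append, List.count_replicate, ih hnd, hxa, Ne.symm hxa]

theorem pv_pairwise_flatMap (as : List Char) (h : as.Pairwise (· < ·)) (n : Char → Nat) :
    (as.flatMap fun c => List.replicate (n c) c).Pairwise (· ≤ ·) := by
  induction as with
  | nil => simp
  | cons a t ih =>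
    rw [List.pairwise_cons] at h
    obtain ⟨ha, ht⟩ := h
    simp only [List.flatMap_cons]
    refine List.pairwise_append.mpr ⟨?_, ih ht, ?_⟩
    · exact List.pairwise_replicate.mpr (Or.inr le_rfl)
    · intro x hx y hy
      rw [List.eq_of_mem_replicate hx]
      obtain ⟨b, hb, hyb⟩ := List.mem_flatMap.mp hy
      rw [List.eq_of_mem_replicate hyb]
      exact le_of_lt (ha b hb)

theorem pv_sorted_eq (ls : List Char) (h : ∀ c ∈ ls, c ∈ pvAlpha) :
    PySem.List.sorted ls (fun c => c) false = pvAlpha.flatMap (fun c => List.replicate (ls.count c) c) := by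
  apply PySem.List.eq_of_perm_of_pairwise_le_of_injective (fun c => c) (fun a b hab => hab)
  · refine (PySem.List.sorted_perm ls (fun c => c) false).trans (List.perm_iff_count.mpr fun x => ?_).symm
    rw [pv_count_flatMap pvAlpha (by decide) _ x]
    split
    · rfl
    · exact (List.count_eq_zero.mpr fun hx => ‹x ∉ pvAlpha› (h x hx)).symm
  · exact PySem.List.sorted_pairwise ls (fun c => c)
  · exact pv_pairwise_flatMap pvAlpha (by decide) _


theorem pv_count_single (c : Char) (l : List Char) :
    PySem.Chars.count l [c] = l.count c := by
  suffices h : ∀ (fuel : Nat) (l : List Char) (acc : Nat), l.length ≤ fuel →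
      PySem.Chars.count.go [c] fuel l acc = acc + l.count c by
    simpa [PySem.Chars.count] using h l.length l 0 le_rfl
  intro fuel
  induction fuel with
  | zero => intro l acc h; rw [List.length_eq_zero_iff.mp (Nat.le_zero.mp h)]; simp [PySem.Chars.count.go]
  | succ n ih =>
    intro l acc h
    cases l with
    | nil => simp [PySem.Chars.count.go]
    | cons x t =>
      simp only [PySem.Chars.count.go, List.isPrefixOf]
      by_cases hx : c = x
      · subst hx
        simp only [List.length_cons] at h
        simp [ih t (acc + 1) (by omega)]
        omega
      · simp only [List.length_cons] at h
        simp [hx, ih t acc (by omega), Ne.symm hx]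

theorem pv_bridge (ls : List Char) :
    (PySem.List.pyRange 0 26 1).flatMap (fun i => List.replicate (ls.count (Char.ofNat (97 + i.toNat)))
        (String.ofList (PySem.Chars.upperChar (Char.ofNat (97 + i.toNat)) :: List.replicate i.toNat (Char.ofNat (97 + i.toNat)))))
    = pvAlpha.flatMap (fun c => List.replicate (ls.count c)
        (((PySem.Dict.mk [('a', "A"),
     ('b', "Bb"),
     ('c', "Ccc"),
     ('d', "Dddd"),
     ('e', "Eeeee"),
     ('f', "Ffffff"),
     ('g', "Ggggggg"),
     ('h', "Hhhhhhhh"),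
     ('i', "Iiiiiiiii"),
     ('j', "Jjjjjjjjjj"),
     ('k', "Kkkkkkkkkkk"),
     ('l', "Llllllllllll"),
     ('m', "Mmmmmmmmmmmmm"),
     ('n', "Nnnnnnnnnnnnnn"),
     ('o', "Ooooooooooooooo"),
     ('p', "Pppppppppppppppp"),
     ('q', "Qqqqqqqqqqqqqqqqq"),
     ('r', "Rrrrrrrrrrrrrrrrrr"),
     ('s', "Sssssssssssssssssss"),
     ('t', "Tttttttttttttttttttt"),
     ('u', "Uuuuuuuuuuuuuuuuuuuuu"),
     ('v', "Vvvvvvvvvvvvvvvvvvvvvv"),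
     ('w', "Wwwwwwwwwwwwwwwwwwwwwww"),
     ('x', "Xxxxxxxxxxxxxxxxxxxxxxxx"),
     ('y', "Yyyyyyyyyyyyyyyyyyyyyyyyy"),
     ('z', "Zzzzzzzzzzzzzzzzzzzzzzzzzz")] : PySem.Dict Char String).get? c).getD "")) := by
  rfl

-- ===== VERDICT (by name: the statement is the Claim_ definition above) =====
theorem alpha_seq_spec : Claim_equal_alpha_seq := by
  intro s _ hp
  unfold Pre_alpha_seq at hp
  unfold Spec_alpha_seq
  simp only [alpha_seq, alpha_seq_alt]
  rw [List.all_eq_true] at hp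
  have hmem : ∀ c ∈ PySem.Chars.lower s.toList, c ∈ pvAlpha := by
    intro c hc
    obtain ⟨c', hc', rfl⟩ := List.mem_map.mp hc
    exact pv_mem_alpha c' (by simpa using hp c' hc')
  rw [pv_sorted_eq _ hmem, List.map_flatMap]
  simp only [List.map_replicate]
  rw [PySem.List.foldl_append_eq_flatMap]
  simp only [PySem.Str.count, PySem.Str.toList_lower, String.toList_ofList,
    pv_count_single, List.nil_append]
  exact congrArg (PySem.Str.join ",") (pv_bridge (PySem.Chars.lower s.toList)).symm
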